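-- pv_equiv track=rewrite | github.com/jute0311/B21 | piecesinfo.py | getUsedPieces
-- ===== SOURCE A (Python) =====
-- def getUsedPieces(pieces):
--     all_pieces = ['a','b','c','d','e','f','g','h','i','j','k','l','m','n','o','p','q','r','s','t','u']
--     used_pieces = []
--     for one_piece in all_pieces :
--         judge = 0
--         for piece in pieces:
--             if one_piece == piece :
--                 judge = 1
--         if judge == 0 :
--             used_pieces.append(one_piece)
--
--     return  used_pieces
-- ===== SOURCE B (Python) =====
-- def getUsedPieces(pieces):
--     used = ['a','b','c','d','e','f','g','h','i','j','k','l','m','n','o','p','q','r','s','t','u']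
--     for piece in pieces:
--         if piece in used:
--             used.remove(piece)
--     return used
-- ===== Notes on version B (the rewrite author's own statement) =====
-- stated objective: simpler
-- what changed: B starts from a copy of the fixed 21-letter list and loops over the input once, removing each matching letter, instead of A's nested scan of the whole input for every fixed letter.
import Mathlib
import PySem

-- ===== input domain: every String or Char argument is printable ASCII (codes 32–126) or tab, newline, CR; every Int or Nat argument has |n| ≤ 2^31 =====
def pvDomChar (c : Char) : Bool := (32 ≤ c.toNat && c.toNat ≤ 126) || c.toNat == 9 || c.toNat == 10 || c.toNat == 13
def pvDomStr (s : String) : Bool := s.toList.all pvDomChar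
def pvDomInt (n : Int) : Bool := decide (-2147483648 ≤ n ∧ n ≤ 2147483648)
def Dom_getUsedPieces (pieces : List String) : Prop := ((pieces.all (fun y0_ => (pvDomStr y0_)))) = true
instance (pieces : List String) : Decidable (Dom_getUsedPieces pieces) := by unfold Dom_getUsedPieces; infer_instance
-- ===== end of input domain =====

-- B inverts A's traversal: it copies the fixed list and removes each input letter once, instead of scanning the input per fixed letter (objective: simpler).

def pvAllPieces : List String :=
  ["a","b","c","d","e","f","g","h","i","j","k","l","m","n","o","p","q","r","s","t","u"]

-- ===== PORT A =====
def getUsedPieces (pieces : List String) : List String :=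
  pvAllPieces.foldl
    (fun used_pieces one_piece =>
      let judge : Int := pieces.foldl (fun j piece => if one_piece == piece then 1 else j) 0
      if judge == 0 then used_pieces ++ [one_piece] else used_pieces)
    []

-- ===== PORT B =====
def getUsedPieces_alt (pieces : List String) : List String :=
  pieces.foldl
    (fun used piece =>
      if used.contains piece then (PySem.List.remove? used piece).getD used else used)
    pvAllPieces

-- ===== PRECONDITION & SPEC =====
def Spec_getUsedPieces (pieces : List String) (out : List String) : Prop := out = getUsedPieces_alt pieces
instance (pieces : List String) (out : List String) : Decidable (Spec_getUsedPieces pieces out) := by unfold Spec_getUsedPieces; infer_instance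

-- ===== CLAIM (what is proved, stated in full; the proofs are below) =====
def Claim_equal_getUsedPieces : Prop := ∀ (pieces : List String), Dom_getUsedPieces pieces → Spec_getUsedPieces pieces (getUsedPieces pieces)

-- ===== LEMMAS AND PROOFS =====

-- A's inner loop computes membership (last-match flag = any-match flag)
theorem judge_eq (one : String) (pieces : List String) (j : Int) :
    pieces.foldl (fun j piece => if one == piece then 1 else j) j
      = if pieces.contains one then 1 else j := by
  induction pieces generalizing j with
  | nil => simp
  | cons p ps ih =>
    simp only [List.foldl_cons, List.contains_cons]
    rw [ih]
    by_cases h : one = p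
    · simp [h]
    · simp [h]

-- A equals filtering the fixed list by non-membership
theorem portA_eq_filter (pieces : List String) :
    getUsedPieces pieces = pvAllPieces.filter (fun x => !pieces.contains x) := by
  unfold getUsedPieces
  have : ∀ (l : List String) (acc : List String),
      l.foldl (fun used one =>
        let judge : Int := pieces.foldl (fun j piece => if one == piece then 1 else j) 0
        if judge == 0 then used ++ [one] else used) acc
      = acc ++ l.filter (fun x => !pieces.contains x) := by
    intro l
    induction l with
    | nil => simp
    | cons x xs ih =>
      intro acc
      simp only [List.foldl_cons, List.filter_cons]
      rw [ih]
      simp only [judge_eq]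
      by_cases h : x ∈ pieces
      · simp [h]
      · simp [h]
  simpa using this pvAllPieces []

-- B's loop on a duplicate-free list computes the same filter
theorem portB_loop_eq_filter (pieces : List String) :
    ∀ (L : List String), L.Nodup →
      pieces.foldl
        (fun used piece =>
          if used.contains piece then (PySem.List.remove? used piece).getD used else used) L
      = L.filter (fun x => !pieces.contains x) := by
  induction pieces with
  | nil => intro L _; simp
  | cons p ps ih =>
    intro L hL
    simp only [List.foldl_cons]
    have hstep : (if L.contains p then (PySem.List.remove? L p).getD L else L) = L.erase p := by
      by_cases h : p ∈ L
      · have hc : L.contains p = true := by simpa using h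
        rw [if_pos hc, PySem.List.remove?_eq_some_erase L p h, Option.getD_some]
      · have hc : ¬ L.contains p = true := by simpa using h
        rw [if_neg hc, List.erase_of_not_mem h]
    rw [hstep, ih _ (hL.erase p), hL.erase_eq_filter]
    rw [List.filter_filter]
    apply List.filter_congr
    intro x _
    by_cases h : x = p <;> by_cases h2 : x ∈ ps <;> simp [h, h2]

theorem portB_eq_filter (pieces : List String) :
    getUsedPieces_alt pieces = pvAllPieces.filter (fun x => !pieces.contains x) := by
  unfold getUsedPieces_alt
  exact portB_loop_eq_filter pieces pvAllPieces (by decide)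

-- ===== VERDICT (by name: the statement is the Claim_ definition above) =====
theorem getUsedPieces_spec : Claim_equal_getUsedPieces := by
  intro pieces _
  unfold Spec_getUsedPieces
  rw [portA_eq_filter, portB_eq_filter]
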